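-- pv_equiv track=rewrite | github.com/tibbe78/Yatzy | yatzy.py | count_pair_score
-- ===== SOURCE A (Python) =====
-- from typing import List, Dict
--
-- def count_pair_score(dices: List[int], notused):
--     dices.sort(reverse=True)
--     for i, dice in enumerate(dices):
--         if i > len(dices)-2:
--             return 0
--         if dice == dices[i+1]:
--             return dice * 2
--     return 0
-- ===== SOURCE B (Python) =====
-- def count_pair_score(dices, notused):
--     dices.sort(reverse=True)
--     counts = {}
--     for d in dices:
--         counts[d] = counts.get(d, 0) + 1
--     pairs = [v for v, c in counts.items() if c >= 2]
--     return 2 * max(pairs) if pairs else 0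
-- ===== Notes on version B (the rewrite author's own statement) =====
-- stated objective: alternative
-- what changed: Replaces the index-based early-return adjacent-pair scan with a frequency map built in one pass, then takes the maximum die value whose count is at least 2 (the in-place reverse sort is kept so the argument mutation matches A).
import Mathlib
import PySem

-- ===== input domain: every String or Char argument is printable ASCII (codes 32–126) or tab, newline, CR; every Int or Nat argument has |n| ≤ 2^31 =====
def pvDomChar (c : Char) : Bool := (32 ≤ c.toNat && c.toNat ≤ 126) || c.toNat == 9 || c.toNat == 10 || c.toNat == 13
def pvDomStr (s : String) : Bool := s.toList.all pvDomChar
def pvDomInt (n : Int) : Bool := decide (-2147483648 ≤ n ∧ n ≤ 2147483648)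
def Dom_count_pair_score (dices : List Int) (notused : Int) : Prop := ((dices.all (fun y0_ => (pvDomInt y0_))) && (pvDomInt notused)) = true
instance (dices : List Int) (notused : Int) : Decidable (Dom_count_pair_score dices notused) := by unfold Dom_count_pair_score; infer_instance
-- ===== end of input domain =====

-- B replaces A's index-based adjacent-pair scan with a one-pass frequency map and a max over
-- repeated values (objective: alternative). Both A and B sort the argument in place; the
-- theorems below are about the return value.

-- ===== PORT A =====
-- the 'for i, dice in enumerate(dices)' loop with its two early returns
def pvPairLoopA (s : List Int) : List (Int × Int) → Int
  | [] => 0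
  | (i, dice) :: rest =>
    if i > (s.length : Int) - 2 then 0
    else
      match PySem.List.pyGet? s (i + 1) with
      | some d' => if dice = d' then dice * 2 else pvPairLoopA s rest
      | none => 0   -- unreachable: i ≤ len-2 keeps i+1 in range

def count_pair_score (dices : List Int) (notused : Int) : Int :=
  let s := PySem.List.sorted dices (fun x => x) true
  pvPairLoopA s (PySem.List.enumerate s)

-- ===== PORT B =====
def count_pair_score_alt (dices : List Int) (notused : Int) : Int :=
  let s := PySem.List.sorted dices (fun x => x) true
  let counts := s.foldl (fun d x => d.insert x (d.getD x 0 + 1)) (PySem.Dict.empty : PySem.Dict Int Int)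
  let pairs := (counts.items.filter (fun p => 2 ≤ p.2)).map (fun p => p.1)
  match PySem.List.max? pairs (fun y => y) with
  | some m => 2 * m
  | none => 0

-- ===== PRECONDITION & SPEC =====
def Spec_count_pair_score (dices : List Int) (notused : Int) (out : Int) : Prop := out = count_pair_score_alt dices notused
instance (dices : List Int) (notused : Int) (out : Int) : Decidable (Spec_count_pair_score dices notused out) := by unfold Spec_count_pair_score; infer_instance

-- ===== CLAIM (what is proved, stated in full; the proofs are below) =====
def Claim_equal_count_pair_score : Prop := ∀ (dices : List Int) (notused : Int), Dom_count_pair_score dices notused → Spec_count_pair_score dices notused (count_pair_score dices notused)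

-- ===== LEMMAS AND PROOFS =====

-- adjacency recursion: what A's enumerated loop computes on the sorted list
def pvAdj : List Int → Int
  | a :: b :: t => if a = b then a * 2 else pvAdj (b :: t)
  | _ => 0

theorem pvPairLoopA_eq_adj (s : List Int) : ∀ (t : List Int) (k : Nat),
    s.drop k = t → pvPairLoopA s (PySem.List.enumerate t (k : Int)) = pvAdj t := by
  intro t
  induction t with
  | nil => intro k hk; simp [PySem.List.enumerate_nil, pvPairLoopA, pvAdj]
  | cons d rest ih =>
    intro k hk
    have hklen : k < s.length := by
      by_contra h
      rw [List.drop_eq_nil_of_le (by omega)] at hk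
      exact (List.cons_ne_nil _ _) hk.symm
    have hlen : rest.length + 1 = s.length - k := by
      have := congrArg List.length hk
      simp [List.length_drop] at this
      omega
    rw [PySem.List.enumerate_cons, pvPairLoopA]
    cases rest with
    | nil =>
      have : (k : Int) > (s.length : Int) - 2 := by
        simp at hlen; omega
      rw [if_pos this]; rfl
    | cons e rest' =>
      have hlt : ¬ ((k : Int) > (s.length : Int) - 2) := by
        simp at hlen; omega
      rw [if_neg hlt]
      have hdrop : s.drop (k + 1) = e :: rest' := by
        rw [← List.drop_drop (i := 1) (j := k), hk]; rfl
      have h1 : k + 1 < s.length := by simp at hlen; omega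
      have he : s[k+1] = e := by
        have h2 : (s.drop (k+1))[0]'(by rw [hdrop]; simp) = e := by simp [hdrop]
        simpa [List.getElem_drop] using h2
      have hget : PySem.List.pyGet? s ((k : Int) + 1) = some e := by
        rw [show ((k : Int) + 1) = ((k + 1 : Nat) : Int) by push_cast; ring,
            PySem.List.pyGet?_natCast, List.getElem?_eq_getElem h1, he]
      rw [hget]
      show (if d = e then d * 2 else pvPairLoopA s (PySem.List.enumerate (e :: rest') ((k:Int) + 1))) = pvAdj (d :: e :: rest')
      rw [pvAdj]
      by_cases hde : d = e
      · simp [hde]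
      · rw [if_neg hde, if_neg hde,
            show ((k : Int) + 1) = ((k + 1 : Nat) : Int) by push_cast; ring,
            ih (k + 1) hdrop]

-- B's candidate list, after rewriting the counter dict away
theorem pvPairs_eq (s : List Int) :
    (((s.foldl (fun d x => d.insert x (d.getD x 0 + 1)) (PySem.Dict.empty : PySem.Dict Int Int)).items.filter
        (fun p => 2 ≤ p.2)).map (fun p => p.1))
      = (PySem.Set.ofList s).filter (fun v => 2 ≤ (s.count v : Int)) := by
  rw [PySem.Dict.foldl_insert_getD_add_one_eq_counter s, PySem.Dict.items_counter, List.filter_map, List.map_map]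
  simp [Function.comp_def]

-- core agreement on a descending-sorted list
theorem pvAdj_eq_core (s : List Int) (hs : s.Pairwise (fun a b => b ≤ a)) :
    pvAdj s = (match PySem.List.max?
        ((PySem.Set.ofList s).filter (fun v => 2 ≤ (s.count v : Int))) (fun y => y) with
      | some m => 2 * m
      | none => 0) := by
  induction s with
  | nil => simp [pvAdj, PySem.Set.ofList_nil, PySem.List.max?]
  | cons a t ih =>
    cases t with
    | nil => simp [pvAdj, PySem.Set.ofList, PySem.Set.add, PySem.List.max?]
    | cons b t' =>
      have hab : b ≤ a := (List.pairwise_cons.mp hs).1 b (by simp)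
      have hmem : ∀ x ∈ b :: t', x ≤ a := (List.pairwise_cons.mp hs).1
      have htail : (b :: t').Pairwise (fun a b => b ≤ a) := (List.pairwise_cons.mp hs).2
      by_cases hEq : a = b
      · -- a pair at the head: the max candidate is a
        rw [pvAdj, if_pos hEq]
        have hcnt : 2 ≤ ((a :: b :: t').count a : Int) := by
          have : 0 < (b :: t').count a := List.count_pos_iff.mpr (by simp [hEq])
          simp [List.count_cons]; omega
        have hmemP : a ∈ (PySem.Set.ofList (a :: b :: t')).filter
            (fun v => 2 ≤ ((a :: b :: t').count v : Int)) := by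
          simp only [List.mem_filter, PySem.Set.mem_ofList]
          exact ⟨by simp, by simpa using hcnt⟩
        obtain ⟨m, hm⟩ : ∃ m, PySem.List.max?
            ((PySem.Set.ofList (a :: b :: t')).filter (fun v => 2 ≤ ((a :: b :: t').count v : Int)))
            (fun y => y) = some m := by
          cases hmax : PySem.List.max?
              ((PySem.Set.ofList (a :: b :: t')).filter (fun v => 2 ≤ ((a :: b :: t').count v : Int)))
              (fun y => y) with
          | none => rw [PySem.List.max?_eq_none_iff] at hmax; rw [hmax] at hmemP; simp at hmemP
          | some m => exact ⟨m, rfl⟩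
        have hma : m = a := by
          have h1 : a ≤ m := PySem.List.max?_isMax hm a hmemP
          have hm' := PySem.List.max?_mem hm
          rw [List.mem_filter] at hm'
          have hm'' : m ∈ a :: b :: t' := by
            have := hm'.1
            rwa [PySem.Set.mem_ofList] at this
          rcases List.mem_cons.mp hm'' with h | h
          · omega
          · have := hmem m h; omega
        rw [hm, hma]; ring
      · -- a is strictly larger than everything else: it is no candidate, drop it
        have hba : b < a := lt_of_le_of_ne hab (fun h => hEq h.symm)
        have hleb : ∀ x ∈ b :: t', x ≤ b := by
          intro x hx
          rcases List.mem_cons.mp hx with h | h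
          · exact le_of_eq h
          · exact (List.pairwise_cons.mp htail).1 x h
        have hnotmem : a ∉ b :: t' := fun h => absurd (hleb a h) (not_le.mpr hba)
        have hof : PySem.Set.ofList (a :: b :: t') = a :: PySem.Set.ofList (b :: t') := by
          rw [PySem.Set.ofList_cons]
          congr 1
          apply List.filter_eq_self.mpr
          intro y hy
          have hyb : y ∈ b :: t' := by rwa [PySem.Set.mem_ofList] at hy
          have : y ≠ a := fun h => hnotmem (h ▸ hyb)
          simp [this]
        have hcnta0 : List.count a (b :: t') = 0 := List.count_eq_zero.mpr hnotmem
        have hcnt : ∀ v ∈ b :: t', (a :: b :: t').count v = (b :: t').count v := by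
          intro v hv
          have hav : a ≠ v := fun h => hnotmem (h ▸ hv)
          simp [List.count_cons, hav]
        have hfilter : (PySem.Set.ofList (a :: b :: t')).filter
              (fun v => 2 ≤ ((a :: b :: t').count v : Int))
            = (PySem.Set.ofList (b :: t')).filter (fun v => 2 ≤ ((b :: t').count v : Int)) := by
          rw [hof, List.filter_cons]
          rw [if_neg (by simp [hcnta0])]
          apply List.filter_congr
          intro v hv
          rw [hcnt v (by rwa [← PySem.Set.mem_ofList])]
        rw [pvAdj, if_neg hEq, hfilter, ih htail]

-- ===== VERDICT (by name: the statement is the Claim_ definition above) =====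
theorem count_pair_score_spec : Claim_equal_count_pair_score := by
  intro dices notused _
  show pvPairLoopA (PySem.List.sorted dices (fun x => x) true)
      (PySem.List.enumerate (PySem.List.sorted dices (fun x => x) true)) =
    (match PySem.List.max?
        ((((PySem.List.sorted dices (fun x => x) true).foldl
            (fun d x => d.insert x (d.getD x 0 + 1)) (PySem.Dict.empty : PySem.Dict Int Int)).items.filter
          (fun p => 2 ≤ p.2)).map (fun p => p.1)) (fun y => y) with
      | some m => 2 * m
      | none => 0)
  rw [pvPairs_eq]
  rw [show (PySem.List.enumerate (PySem.List.sorted dices (fun x => x) true) : List (Int × Int))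
        = PySem.List.enumerate (PySem.List.sorted dices (fun x => x) true) ((0 : Nat) : Int) by norm_num]
  rw [pvPairLoopA_eq_adj _ _ 0 List.drop_zero]
  exact pvAdj_eq_core _ (PySem.List.sorted_pairwise_rev dices (fun x => x))
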